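-- pv_equiv track=rewrite | github.com/killer123578910-droid/pyth | ktrachiahetcho7(py1038).py | solve
-- ===== SOURCE A (Python) =====
-- def solve(n, inv, timee):
--     if int(n)%7==0:
--         return n
--     kq = int(n) + int(inv)
--     if kq % 7 == 0:
--         return str(kq)
--     if timee >= 1000:
--         return "-1"
--     inv = str(kq)[::-1]
--     return solve(kq, inv, timee + 1)
-- ===== SOURCE B (Python) =====
-- def solve(n, inv, timee):
--     # Idiomatic decomposition: a lazy generator of the digit-reversal sum
--     # iterates, consumed by next() searching for the first multiple of 7.
--     if int(n) % 7 == 0: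
--         return n
--
--     def sums():
--         x = int(n) + int(inv)
--         yield x
--         for _ in range(max(0, 1000 - timee)):
--             x += int(str(x)[::-1])
--             yield x
--
--     return next((str(x) for x in sums() if x % 7 == 0), "-1")
-- ===== Notes on version B (the rewrite author's own statement) =====
-- stated objective: idiomatic
-- what changed: A's tail recursion (which re-parses strings and re-runs a vacuous divisibility guard each call) is replaced by a lazy generator producing the digit-reversal sum iterates, consumed by next() with a default -1: producing the sequence is separated from searching it for the first multiple of 7.
import Mathlib
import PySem

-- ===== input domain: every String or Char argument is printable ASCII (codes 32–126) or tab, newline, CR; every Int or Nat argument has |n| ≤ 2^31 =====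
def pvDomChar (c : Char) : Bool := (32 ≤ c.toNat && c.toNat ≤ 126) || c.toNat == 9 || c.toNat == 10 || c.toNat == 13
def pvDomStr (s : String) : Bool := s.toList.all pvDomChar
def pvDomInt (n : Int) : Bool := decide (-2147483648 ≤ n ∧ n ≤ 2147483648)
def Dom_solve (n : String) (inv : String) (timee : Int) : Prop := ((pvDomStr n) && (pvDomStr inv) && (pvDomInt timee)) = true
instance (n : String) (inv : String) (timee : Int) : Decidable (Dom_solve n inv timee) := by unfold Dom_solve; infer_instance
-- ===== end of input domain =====

-- B replaces A's tail recursion by a lazy stream of the sum iterates searched for the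
-- first multiple of 7 (idiomatic decomposition); A = B is proved on Pre_solve,
-- exactly the inputs where A returns.

-- ===== PORT A =====
-- After the first recursive call Python's `n` is an int and `inv` is a str, so A's
-- recursion is ported as `solveGo` over an Int `n` (fuel is only a totality guard:
-- the recursion stops once timee ≥ 1000, so the chosen fuel is never exhausted).
-- str(kq)[::-1] is ported as the reversal of (toStr kq); int(inv) = PySem.Int.ofStr?
-- (none = ValueError, excluded by Pre_solve, ported as ""); the first branch
-- `if int(n)%7==0: return n` would return the int n there — unreachable at every
-- recursive call since kq%7≠0 was just checked — ported as toStr n.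
def solveGo (fuel : Nat) (n : Int) (inv : String) (timee : Int) : String :=
  if PySem.Int.mod n 7 = 0 then PySem.Int.toStr n
  else
    match PySem.Int.ofStr? inv with
    | none => ""                                  -- int(inv) raises ValueError
    | some b =>
      let kq := n + b
      if PySem.Int.mod kq 7 = 0 then PySem.Int.toStr kq
      else if 1000 ≤ timee then "-1"
      else
        match fuel with
        | 0 => ""                                 -- never reached (fuel ≥ steps left)
        | fuel + 1 =>
          solveGo fuel kq (String.ofList (PySem.Int.toStr kq).toList.reverse) (timee + 1)

-- top-level call: n and inv are strings; `return n` returns the original string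
def solve (n : String) (inv : String) (timee : Int) : String :=
  match PySem.Int.ofStr? n with
  | none => ""                                    -- int(n) raises ValueError
  | some a =>
    if PySem.Int.mod a 7 = 0 then n
    else solveGo (1002 - timee).toNat a inv timee

-- ===== PORT B =====
-- port of Source B: the lazy generator of iterates x, x + rev x, … consumed by
-- `next((str(x) for x in sums() if x % 7 == 0), "-1")`.  Since next() pulls the
-- generator only until the first multiple of 7 (or the range is exhausted, giving
-- the default "-1"), the fused consumption is one recursion over (budget, x): the
-- generator state is the int x and the remaining range length; `int(str(x)[::-1])`
-- raising ValueError (negative x, excluded by Pre_solve) is ported as "".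
def nextSum? (x : Int) : Option Int :=
  (PySem.Int.ofStr? (String.ofList (PySem.Int.toStr x).toList.reverse)).map (fun r => x + r)

def firstDiv7 (budget : Nat) (x : Int) : String :=
  if PySem.Int.mod x 7 = 0 then PySem.Int.toStr x
  else
    match budget with
    | 0 => "-1"                                   -- generator exhausted: next's default
    | budget + 1 =>
      match nextSum? x with
      | none => ""                                -- int(str(x)[::-1]) raises ValueError
      | some y => firstDiv7 budget y

def solve_alt (n : String) (inv : String) (timee : Int) : String :=
  match PySem.Int.ofStr? n with
  | none => ""                                    -- int(n) raises ValueError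
  | some a =>
    if PySem.Int.mod a 7 = 0 then n
    else
      match PySem.Int.ofStr? inv with
      | none => ""                                -- int(inv) raises ValueError
      | some b => firstDiv7 (1000 - timee).toNat (a + b)

-- ===== PRECONDITION & SPEC =====
-- Pre_solve admits exactly the inputs on which Python A returns: int(n) must parse;
-- then either it is divisible by 7 (A returns at once), or int(inv) must parse and the
-- loop must never reverse a negative number's string (str(kq)[::-1] of a negative kq
-- ends in '-' and int() of it raises ValueError) — i.e. the first sum is divisible by
-- 7, or the step budget is already exhausted, or the first sum is nonnegative (then
-- every later value stays nonnegative and A returns within 1000 - timee steps).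
def preCheck (n : String) (inv : String) (timee : Int) : Bool :=
  match PySem.Int.ofStr? n with
  | none => false
  | some a =>
    PySem.Int.mod a 7 = 0 ||
      match PySem.Int.ofStr? inv with
      | none => false
      | some b => PySem.Int.mod (a + b) 7 = 0 || 1000 ≤ timee || 0 ≤ a + b

def Pre_solve (n : String) (inv : String) (timee : Int) : Prop := preCheck n inv timee = true
instance (n : String) (inv : String) (timee : Int) : Decidable (Pre_solve n inv timee) := by
  unfold Pre_solve; infer_instance

def pvWitness_solve : String × String × Int := ("8", "6", 5)

def Spec_solve (n : String) (inv : String) (timee : Int) (out : String) : Prop := out = solve_alt n inv timee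
instance (n : String) (inv : String) (timee : Int) (out : String) : Decidable (Spec_solve n inv timee out) := by unfold Spec_solve; infer_instance

-- ===== CLAIM (what is proved, stated in full; the proofs are below) =====
def Claim_equal_solve : Prop := ∀ (n : String) (inv : String) (timee : Int), Dom_solve n inv timee → Pre_solve n inv timee → Spec_solve n inv timee (solve n inv timee)

-- ===== LEMMAS AND PROOFS =====

-- when int(inv) fails to parse, A's recursion returns the "" sentinel (any fuel)
lemma solveGo_none (fuel : Nat) (n : Int) (inv : String) (t : Int)
    (hi : PySem.Int.ofStr? inv = none) :
    solveGo fuel n inv t = if PySem.Int.mod n 7 = 0 then PySem.Int.toStr n else "" := by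
  unfold solveGo; simp [hi]

-- the bridge: A's string-carrying recursion equals B's fused search over the stream,
-- with B's budget = 1000 - t and any sufficient A-side fuel
lemma solveGo_eq_firstDiv7 (fB : Nat) :
    ∀ (fA : Nat) (a b t : Int) (inv : String), PySem.Int.ofStr? inv = some b →
      PySem.Int.mod a 7 ≠ 0 → fB = (1000 - t).toNat → fB ≤ fA →
      solveGo fA a inv t = firstDiv7 fB (a + b) := by
  induction fB with
  | zero =>
    intro fA a b t inv hi ha hfb _
    have ht : 1000 ≤ t := by omega
    unfold solveGo firstDiv7
    simp only [hi, if_neg ha]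
    by_cases h7 : PySem.Int.mod (a + b) 7 = 0
    · rw [if_pos h7, if_pos h7]
    · rw [if_neg h7, if_neg h7, if_pos ht]
  | succ g ih =>
    intro fA a b t inv hi ha hfb hle
    have ht : ¬ 1000 ≤ t := by omega
    obtain ⟨fA', rfl⟩ : ∃ fA', fA = fA' + 1 := ⟨fA - 1, by omega⟩
    unfold solveGo firstDiv7
    simp only [hi, if_neg ha]
    by_cases h7 : PySem.Int.mod (a + b) 7 = 0
    · rw [if_pos h7, if_pos h7]
    · rw [if_neg h7, if_neg h7, if_neg ht]
      show solveGo fA' (a + b) (String.ofList (PySem.Int.toStr (a + b)).toList.reverse) (t + 1) =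
        match nextSum? (a + b) with | none => "" | some y => firstDiv7 g y
      rcases hr : PySem.Int.ofStr? (String.ofList (PySem.Int.toStr (a + b)).toList.reverse) with _ | b'
      · rw [solveGo_none _ _ _ _ hr, if_neg h7]
        simp only [nextSum?, hr, Option.map_none]
      · simp only [nextSum?, hr, Option.map_some]
        exact ih fA' (a + b) b' (t + 1) _ hr h7 (by omega) (by omega)

-- ===== VERDICT (by name: the statement is the Claim_ definition above) =====
theorem solve_spec : Claim_equal_solve := by
  intro n inv timee _ hpre
  unfold Pre_solve preCheck at hpre
  unfold Spec_solve solve solve_alt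
  rcases hn : PySem.Int.ofStr? n with _ | a
  · rfl
  · rw [hn] at hpre
    show (if PySem.Int.mod a 7 = 0 then n else solveGo (1002 - timee).toNat a inv timee) =
      (if PySem.Int.mod a 7 = 0 then n
       else match PySem.Int.ofStr? inv with
         | none => ""
         | some b => firstDiv7 (1000 - timee).toNat (a + b))
    by_cases ha : PySem.Int.mod a 7 = 0
    · rw [if_pos ha, if_pos ha]
    · rw [if_neg ha, if_neg ha]
      rcases hi : PySem.Int.ofStr? inv with _ | b
      · rw [hi] at hpre
        simp only [Bool.or_false, decide_eq_true_eq] at hpre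
        exact absurd hpre ha
      · show solveGo (1002 - timee).toNat a inv timee = firstDiv7 (1000 - timee).toNat (a + b)
        exact solveGo_eq_firstDiv7 _ _ a b timee inv hi ha rfl (by omega)
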